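-- pv_equiv track=rewrite | github.com/shreyastaware/problem-solving | sparse_arrays.py | matchingStrings_official_answer
-- ===== SOURCE A (Python) =====
-- def matchingStrings_official_answer(strings, queries):
--     words = dict()
--     ans = []
--     for w in strings:
--         if w in words:
--             words[w] += 1
--         else:
--             words[w] = 1
--     for q in queries:
--         if q in words:
--             ans.append(words[q])
--         else:
--             ans.append(0)
--     return ans
-- ===== SOURCE B (Python) =====
-- def _bl(a, x, lo, hi):
--     # leftmost index in a[lo:hi] whose element is >= x (a sorted)
--     while lo < hi:
--         mid = (lo + hi) // 2
--         if a[mid] < x: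
--             lo = mid + 1
--         else:
--             hi = mid
--     return lo
--
--
-- def _br(a, x, lo, hi):
--     # leftmost index in a[lo:hi] whose element is > x (a sorted)
--     while lo < hi:
--         mid = (lo + hi) // 2
--         if a[mid] <= x:
--             lo = mid + 1
--         else:
--             hi = mid
--     return lo
--
--
-- def matchingStrings_official_answer(strings, queries):
--     srt = sorted(strings)
--     n = len(srt)
--     return [_br(srt, q, 0, n) - _bl(srt, q, 0, n) for q in queries]
-- ===== Notes on version B (the rewrite author's own statement) =====
-- stated objective: alternative
-- what changed: Replaces the counting-dictionary build-then-lookup with sorting the strings once and answering each query by two hand-written binary searches (bisect-left/bisect-right difference) on the sorted list.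
import Mathlib
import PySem

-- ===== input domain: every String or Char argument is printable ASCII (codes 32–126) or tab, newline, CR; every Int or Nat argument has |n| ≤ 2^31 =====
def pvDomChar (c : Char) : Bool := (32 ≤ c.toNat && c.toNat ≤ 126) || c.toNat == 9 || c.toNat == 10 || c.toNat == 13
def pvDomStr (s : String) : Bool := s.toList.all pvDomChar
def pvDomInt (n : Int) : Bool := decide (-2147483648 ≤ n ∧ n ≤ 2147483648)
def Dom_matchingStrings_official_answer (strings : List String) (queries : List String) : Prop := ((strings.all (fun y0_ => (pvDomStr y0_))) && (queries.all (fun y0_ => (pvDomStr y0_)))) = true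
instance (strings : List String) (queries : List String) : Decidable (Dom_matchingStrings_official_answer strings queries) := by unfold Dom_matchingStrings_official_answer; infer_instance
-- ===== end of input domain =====

-- B drops A's counting dict: it sorts strings once and answers each query with a
-- bisect_right − bisect_left difference from two hand-written binary searches (alternative algorithm).

-- ===== PORT A =====
def matchingStrings_official_answer (strings : List String) (queries : List String) : List Int :=
  let words := strings.foldl (fun d w =>
    if d.contains w then d.insert w (d.getD w 0 + 1) else d.insert w 1) PySem.Dict.empty
  queries.foldl (fun ans q =>
    if words.contains q then ans ++ [words.getD q 0] else ans ++ [(0 : Int)]) []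

-- ===== PORT B =====
-- _bl: while lo < hi: mid = (lo+hi)//2; if a[mid] < x: lo = mid+1 else: hi = mid.
-- a.getD mid "" is exact for Python's a[mid] here: every call keeps 0 ≤ lo ≤ mid < hi ≤ len(a).
def pvBl (a : List String) (x : String) (lo hi : Nat) : Nat :=
  if lo < hi then
    let mid := (lo + hi) / 2
    if a.getD mid "" < x then pvBl a x (mid + 1) hi else pvBl a x lo mid
  else lo
termination_by hi - lo
decreasing_by all_goals omega

-- _br: same loop with a[mid] <= x.
def pvBr (a : List String) (x : String) (lo hi : Nat) : Nat :=
  if lo < hi then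
    let mid := (lo + hi) / 2
    if a.getD mid "" ≤ x then pvBr a x (mid + 1) hi else pvBr a x lo mid
  else lo
termination_by hi - lo
decreasing_by all_goals omega

def matchingStrings_official_answer_alt (strings : List String) (queries : List String) : List Int :=
  let srt := PySem.List.sorted strings (fun x => x) false
  let n := srt.length
  queries.map (fun q => (pvBr srt q 0 n : Int) - (pvBl srt q 0 n : Int))

-- ===== PRECONDITION & SPEC =====
def Spec_matchingStrings_official_answer (strings : List String) (queries : List String) (out : List Int) : Prop := out = matchingStrings_official_answer_alt strings queries
instance (strings : List String) (queries : List String) (out : List Int) : Decidable (Spec_matchingStrings_official_answer strings queries out) := by unfold Spec_matchingStrings_official_answer; infer_instance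

-- ===== CLAIM (what is proved, stated in full; the proofs are below) =====
def Claim_equal_matchingStrings_official_answer : Prop := ∀ (strings : List String) (queries : List String), Dom_matchingStrings_official_answer strings queries → Spec_matchingStrings_official_answer strings queries (matchingStrings_official_answer strings queries)

-- ===== LEMMAS AND PROOFS =====

-- In a ≤-sorted list, a prefix-closed predicate holding at index m holds on the whole prefix.
theorem countP_ge_of_sorted (a : List String) (p : String → Bool)
    (hmono : ∀ y z : String, y ≤ z → p z → p y)
    (hs : a.Pairwise (· ≤ ·)) (m : Nat) (hm : m < a.length) (hp : p a[m]) :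
    m + 1 ≤ a.countP p := by
  have hpw := List.pairwise_iff_getElem.1 hs
  have hsplit := List.countP_append (l₁ := a.take (m+1)) (l₂ := a.drop (m+1)) (p := p)
  rw [List.take_append_drop] at hsplit
  have htake : (a.take (m+1)).countP p = (a.take (m+1)).length := by
    rw [List.countP_eq_length]
    intro y hy
    rw [List.mem_iff_getElem] at hy
    obtain ⟨i, hi, rfl⟩ := hy
    have hil : i < a.length := lt_of_lt_of_le hi (by simp [List.length_take])
    rw [List.getElem_take]
    have him : i ≤ m := by
      have := hi; simp [List.length_take] at this; omega
    rcases eq_or_lt_of_le him with h | h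
    · subst h; exact hp
    · exact hmono _ _ (hpw i m hil hm h) hp
  have hlen : (a.take (m+1)).length = m + 1 := by
    simp [List.length_take]; omega
  omega


theorem countP_le_of_sorted (a : List String) (p : String → Bool)
    (hmono : ∀ y z : String, y ≤ z → p z → p y)
    (hs : a.Pairwise (· ≤ ·)) (m : Nat) (hm : m < a.length) (hp : ¬ p a[m]) :
    a.countP p ≤ m := by
  have hpw := List.pairwise_iff_getElem.1 hs
  have hsplit := List.countP_append (l₁ := a.take m) (l₂ := a.drop m) (p := p)
  rw [List.take_append_drop] at hsplit
  have hdrop : (a.drop m).countP p = 0 := by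
    rw [List.countP_eq_zero]
    intro y hy
    rw [List.mem_iff_getElem] at hy
    obtain ⟨i, hi, rfl⟩ := hy
    rw [List.getElem_drop]
    intro hpy
    have : m ≤ m + i := Nat.le_add_right _ _
    rcases Nat.eq_or_lt_of_le this with h | h
    · apply hp
      have : m + i = m := h.symm
      simpa [this] using hpy
    · have hmi : m + i < a.length := by simp at hi; omega
      exact hp (hmono _ _ (hpw m (m+i) hm hmi h) hpy)
  have := List.countP_le_length (p := p) (l := a.take m)
  simp [List.length_take] at this
  omega


theorem pvBl_eq (a : List String) (x : String) (hs : a.Pairwise (· ≤ ·)) :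
    ∀ (d lo hi : Nat), hi - lo = d → hi ≤ a.length →
      lo ≤ a.countP (fun y => y < x) → a.countP (fun y => y < x) ≤ hi →
      pvBl a x lo hi = a.countP (fun y => y < x) := by
  intro d
  induction d using Nat.strong_induction_on with
  | _ d ih =>
    intro lo hi hd hhi hlo hk
    rw [pvBl]
    by_cases h : lo < hi
    · simp only [h, if_true]
      have hmid1 : lo ≤ (lo + hi) / 2 := by omega
      have hmid2 : (lo + hi) / 2 < hi := by omega
      have hml : (lo + hi) / 2 < a.length := by omega
      have hget : a.getD ((lo + hi) / 2) "" = a[(lo + hi) / 2] := List.getD_eq_getElem a "" hml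
      by_cases hc : a.getD ((lo + hi) / 2) "" < x
      · simp only [hc, if_true]
        have hge := countP_ge_of_sorted a (fun y => decide (y < x))
          (fun y z hyz hz => decide_eq_true (lt_of_le_of_lt hyz (of_decide_eq_true hz))) hs
          ((lo + hi) / 2) hml (by rw [← hget]; simpa using hc)
        exact ih (hi - ((lo + hi) / 2 + 1)) (by omega) _ _ rfl hhi (by omega) hk
      · simp only [hc, if_false]
        have hle := countP_le_of_sorted a (fun y => decide (y < x))
          (fun y z hyz hz => decide_eq_true (lt_of_le_of_lt hyz (of_decide_eq_true hz))) hs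
          ((lo + hi) / 2) hml (by rw [← hget]; simpa using hc)
        exact ih ((lo + hi) / 2 - lo) (by omega) _ _ rfl (by omega) hlo (by omega)
    · simp only [h, if_false]
      omega


theorem pvBr_eq (a : List String) (x : String) (hs : a.Pairwise (· ≤ ·)) :
    ∀ (d lo hi : Nat), hi - lo = d → hi ≤ a.length →
      lo ≤ a.countP (fun y => y ≤ x) → a.countP (fun y => y ≤ x) ≤ hi →
      pvBr a x lo hi = a.countP (fun y => y ≤ x) := by
  intro d
  induction d using Nat.strong_induction_on with
  | _ d ih =>
    intro lo hi hd hhi hlo hk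
    rw [pvBr]
    by_cases h : lo < hi
    · simp only [h, if_true]
      have hml : (lo + hi) / 2 < a.length := by omega
      have hget : a.getD ((lo + hi) / 2) "" = a[(lo + hi) / 2] := List.getD_eq_getElem a "" hml
      by_cases hc : a.getD ((lo + hi) / 2) "" ≤ x
      · simp only [hc, if_true]
        have hge := countP_ge_of_sorted a (fun y => decide (y ≤ x))
          (fun y z hyz hz => decide_eq_true (le_trans hyz (of_decide_eq_true hz))) hs
          ((lo + hi) / 2) hml (by rw [← hget]; simpa using hc)
        exact ih (hi - ((lo + hi) / 2 + 1)) (by omega) _ _ rfl hhi (by omega) hk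
      · simp only [hc, if_false]
        have hle := countP_le_of_sorted a (fun y => decide (y ≤ x))
          (fun y z hyz hz => decide_eq_true (le_trans hyz (of_decide_eq_true hz))) hs
          ((lo + hi) / 2) hml (by rw [← hget]; simpa using hc)
        exact ih ((lo + hi) / 2 - lo) (by omega) _ _ rfl (by omega) hlo (by omega)
    · simp only [h, if_false]
      omega


theorem countP_le_split (a : List String) (x : String) :
    a.countP (fun y => y ≤ x) = a.countP (fun y => y < x) + a.count x := by
  induction a with
  | nil => simp
  | cons h t ih =>
    rcases lt_trichotomy h x with hc | hc | hc
    · have h1 : decide (h ≤ x) = true := decide_eq_true hc.le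
      have h2 : decide (h < x) = true := decide_eq_true hc
      have h3 : (h == x) = false := beq_eq_false_iff_ne.mpr (ne_of_lt hc)
      rw [List.countP_cons, List.countP_cons, List.count_cons, ih, h1, h2, h3]
      simp; omega
    · subst hc
      have h1 : decide (h ≤ h) = true := decide_eq_true le_rfl
      have h2 : decide (h < h) = false := decide_eq_false (lt_irrefl h)
      have h3 : (h == h) = true := beq_self_eq_true h
      rw [List.countP_cons, List.countP_cons, List.count_cons, ih, h1, h2, h3]
      simp; omega
    · have h1 : decide (h ≤ x) = false := decide_eq_false (not_le_of_gt hc)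
      have h2 : decide (h < x) = false := decide_eq_false (not_lt_of_gt hc)
      have h3 : (h == x) = false := beq_eq_false_iff_ne.mpr (ne_of_gt hc)
      rw [List.countP_cons, List.countP_cons, List.count_cons, ih, h1, h2, h3]
      simp


theorem fold_eq_counter (strings : List String) :
    strings.foldl (fun d w =>
      if d.contains w then d.insert w (d.getD w 0 + 1) else d.insert w 1) PySem.Dict.empty
    = PySem.Dict.counter strings := by
  rw [← PySem.Dict.foldl_insert_getD_add_one_eq_counter]
  congr 1
  funext d w
  by_cases h : d.contains w
  · simp [h]
  · simp [h, PySem.Dict.getD_of_not_contains d 0 (by simpa using h)]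

theorem a_eq_counts (strings queries : List String) :
    matchingStrings_official_answer strings queries
      = queries.map (fun q => (strings.count q : Int)) := by
  unfold matchingStrings_official_answer
  simp only [fold_eq_counter]
  have h : ∀ q : String, (if (PySem.Dict.counter strings).contains q then
      (PySem.Dict.counter strings).getD q 0 else (0 : Int)) = (strings.count q : Int) := by
    intro q
    by_cases h : (PySem.Dict.counter strings).contains q
    · simp [h, PySem.Dict.getD_counter]
    · have hc : strings.count q = 0 := by
        have := PySem.Dict.contains_counter strings q
        simp [h] at this
        simpa [List.count_eq_zero] using this
      simp [h, hc]
  calc queries.foldl (fun ans q => if (PySem.Dict.counter strings).contains q then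
          ans ++ [(PySem.Dict.counter strings).getD q 0] else ans ++ [(0 : Int)]) []
      = queries.foldl (fun ans q => ans ++ [if (PySem.Dict.counter strings).contains q then
          (PySem.Dict.counter strings).getD q 0 else (0 : Int)]) [] := by
        congr 1; funext ans q; split <;> rfl
    _ = queries.map (fun q => if (PySem.Dict.counter strings).contains q then
          (PySem.Dict.counter strings).getD q 0 else (0 : Int)) := by
        simpa using PySem.List.foldl_append_singleton_eq_map
          (fun q => if (PySem.Dict.counter strings).contains q then
            (PySem.Dict.counter strings).getD q 0 else (0 : Int)) queries []
    _ = queries.map (fun q => (strings.count q : Int)) := by simp only [h]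

theorem b_eq_counts (strings queries : List String) :
    matchingStrings_official_answer_alt strings queries
      = queries.map (fun q => (strings.count q : Int)) := by
  unfold matchingStrings_official_answer_alt
  apply List.map_congr_left
  intro q _
  have hs : (PySem.List.sorted strings (fun x => x) false).Pairwise (· ≤ ·) := by
    simpa using PySem.List.sorted_pairwise strings (fun x => x)
  set srt := PySem.List.sorted strings (fun x => x) false with hsrt
  have hbl := pvBl_eq srt q hs srt.length 0 srt.length rfl le_rfl
    (Nat.zero_le _) List.countP_le_length
  have hbr := pvBr_eq srt q hs srt.length 0 srt.length rfl le_rfl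
    (Nat.zero_le _) List.countP_le_length
  rw [hbl, hbr, countP_le_split]
  have hperm : srt.Perm strings := PySem.List.sorted_perm strings (fun x => x) false
  have : srt.count q = strings.count q := hperm.count_eq q
  push_cast
  omega


-- ===== VERDICT (by name: the statement is the Claim_ definition above) =====
theorem matchingStrings_official_answer_spec : Claim_equal_matchingStrings_official_answer := by
  intro strings queries _
  unfold Spec_matchingStrings_official_answer
  rw [a_eq_counts, b_eq_counts]
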